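-- pv_equiv track=rewrite | github.com/juanvallaure1/TFGJuan | algoritmos_geneticos_para_la_composicion_musical.py | func_fitness1
-- ===== SOURCE A (Python) =====
-- def distancia_relativa1(nota1:int, nota2:int)->int:
--     distancia = abs(nota1-nota2) % 12
--     return distancia
--
-- def recompensa(nota:int, siguiente:int)->int:
--     if distancia_relativa1(nota, siguiente) == 0: ##Es la misma nota (no queremos que se repita mucho)
--         return 3
--     elif distancia_relativa1(nota, siguiente) == 1:  ##Segunda menor
--         return 1
--     elif distancia_relativa1(nota, siguiente) == 2: ##Segunda mayor
--         return 2
--     elif distancia_relativa1(nota, siguiente) == 3: ##Tercera menor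
--         return 3
--     elif distancia_relativa1(nota, siguiente) == 4: ##Tercera mayor
--         return 4
--     elif distancia_relativa1(nota, siguiente) == 5: ##Cuarta justa
--         return 5
--     elif distancia_relativa1(nota, siguiente) == 6: ##Cuarta aumentada
--         return 1
--     elif distancia_relativa1(nota, siguiente) == 7: ##Quinta justa
--         return 6
--     elif distancia_relativa1(nota, siguiente) == 8: ##Sexta menor
--         return 2
--     elif distancia_relativa1(nota, siguiente) == 9: ##Sexta mayor
--         return 4
--     elif distancia_relativa1(nota, siguiente) == 10: ##Séptima menor
--         return 3
--     elif distancia_relativa1(nota, siguiente) == 11: ##Séptima mayor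
--         return 2
--     elif distancia_relativa1(nota, siguiente) == 12: ##Octava (muy consonante pero no queremos que aparezca demasiado).
--         return 4
--
-- def func_fitness1( lista_notas:list)->int:  ##Lista notas es una lista de enteros.
--     c = 0
--     fin = len(lista_notas)
--     resul = 0
--     while c < (fin-1):
--
--         rec = recompensa(lista_notas[c], lista_notas[c+1])
--
--         resul += rec
--         c += 1
--     return resul
-- ===== SOURCE B (Python) =====
-- def func_fitness1(lista_notas: list) -> int:
--     reward = [3, 1, 2, 3, 4, 5, 1, 6, 2, 4, 3, 2]
--     counts = {}
--     for a, b in zip(lista_notas, lista_notas[1:]):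
--         d = abs(a - b) % 12
--         counts[d] = counts.get(d, 0) + 1
--     return sum(reward[d] * c for d, c in counts.items())
-- ===== Notes on version B (the rewrite author's own statement) =====
-- stated objective: faster
-- what changed: Replaces the per-pair running accumulation through two Python function calls and a 12-branch if-chain (which recomputes the distance per branch) by one histogram pass over distance classes 0..11 and a weighted sum against a fixed 12-entry reward table.
import Mathlib
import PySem

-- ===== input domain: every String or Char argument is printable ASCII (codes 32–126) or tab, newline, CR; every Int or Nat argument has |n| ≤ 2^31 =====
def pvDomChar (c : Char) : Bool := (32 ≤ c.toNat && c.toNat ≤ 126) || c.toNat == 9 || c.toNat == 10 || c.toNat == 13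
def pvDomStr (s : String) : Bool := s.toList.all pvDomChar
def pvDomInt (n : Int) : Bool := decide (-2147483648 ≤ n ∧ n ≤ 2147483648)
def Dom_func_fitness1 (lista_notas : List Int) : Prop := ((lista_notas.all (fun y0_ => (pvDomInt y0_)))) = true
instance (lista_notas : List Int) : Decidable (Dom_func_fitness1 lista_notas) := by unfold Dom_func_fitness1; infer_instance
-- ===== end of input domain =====

-- B replaces A's per-pair accumulation through a 12-branch if-chain by a histogram of
-- relative-distance classes followed by a weighted sum against a fixed reward table (alternative decomposition).


-- ===== PORT A =====
def distancia_relativa1 (nota1 nota2 : Int) : Int := PySem.Int.mod |nota1 - nota2| 12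

-- Python's recompensa falls off the end (returns None) only if the distance were outside 0..12,
-- which cannot happen; the port returns Option Int accordingly.
def recompensa (nota siguiente : Int) : Option Int :=
  if distancia_relativa1 nota siguiente = 0 then some 3
  else if distancia_relativa1 nota siguiente = 1 then some 1
  else if distancia_relativa1 nota siguiente = 2 then some 2
  else if distancia_relativa1 nota siguiente = 3 then some 3
  else if distancia_relativa1 nota siguiente = 4 then some 4
  else if distancia_relativa1 nota siguiente = 5 then some 5
  else if distancia_relativa1 nota siguiente = 6 then some 1
  else if distancia_relativa1 nota siguiente = 7 then some 6
  else if distancia_relativa1 nota siguiente = 8 then some 2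
  else if distancia_relativa1 nota siguiente = 9 then some 4
  else if distancia_relativa1 nota siguiente = 10 then some 3
  else if distancia_relativa1 nota siguiente = 11 then some 2
  else if distancia_relativa1 nota siguiente = 12 then some 4
  else none

-- the while loop of func_fitness1 (indexing is always in range, so pyGetD's default is never used;
-- `.getD 0` on the reward: recompensa never returns none for an actual distance)
def funcLoop (lista_notas : List Int) (fin c resul : Int) : Int :=
  if c < fin - 1 then
    funcLoop lista_notas fin (c + 1)
      (resul + (recompensa (PySem.List.pyGetD lista_notas c 0)
                           (PySem.List.pyGetD lista_notas (c + 1) 0)).getD 0)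
  else resul
termination_by (fin - 1 - c).toNat
decreasing_by omega

def func_fitness1 (lista_notas : List Int) : Int :=
  funcLoop lista_notas (lista_notas.length : Int) 0 0

-- ===== PORT B =====
def rewardTable : List Int := [3, 1, 2, 3, 4, 5, 1, 6, 2, 4, 3, 2]

def func_fitness1_alt (lista_notas : List Int) : Int :=
  let pairs := lista_notas.zip (PySem.List.slice lista_notas (some 1) none)
  let counts := pairs.foldl
    (fun d p => d.modify (PySem.Int.mod |p.1 - p.2| 12) 0 (· + 1)) PySem.Dict.empty
  (counts.items.map (fun kv => PySem.List.pyGetD rewardTable kv.1 0 * kv.2)).sum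

-- ===== PRECONDITION & SPEC =====
def Spec_func_fitness1 (lista_notas : List Int) (out : Int) : Prop := out = func_fitness1_alt lista_notas
instance (lista_notas : List Int) (out : Int) : Decidable (Spec_func_fitness1 lista_notas out) := by unfold Spec_func_fitness1; infer_instance

-- ===== CLAIM (what is proved, stated in full; the proofs are below) =====
def Claim_equal_func_fitness1 : Prop := ∀ (lista_notas : List Int), Dom_func_fitness1 lista_notas → Spec_func_fitness1 lista_notas (func_fitness1 lista_notas)

-- ===== LEMMAS AND PROOFS =====

-- the reward as a pure table lookup on the distance class
def wd (d : Int) : Int := PySem.List.pyGetD rewardTable d 0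

lemma recompensa_eq (a b : Int) :
    (recompensa a b).getD 0 = wd (distancia_relativa1 a b) := by
  have h0 : 0 ≤ distancia_relativa1 a b := PySem.Int.mod_nonneg _ (by norm_num)
  have h1 : distancia_relativa1 a b < 12 := PySem.Int.mod_lt _ (by norm_num)
  unfold recompensa
  set d := distancia_relativa1 a b with hd
  interval_cases d <;> rfl

lemma loopA (l : List Int) : ∀ (k : Nat) (c resul : Int), 0 ≤ c →
    c.toNat + k + 1 = l.length →
    funcLoop l (l.length : Int) c resul
      = resul + (((l.zip l.tail).drop c.toNat).map
          (fun p => (recompensa p.1 p.2).getD 0)).sum := by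
  intro k
  induction k with
  | zero =>
    intro c resul hc hlen
    rw [funcLoop]
    have hnot : ¬ c < (l.length : Int) - 1 := by omega
    rw [if_neg hnot]
    have : ((l.zip l.tail).drop c.toNat) = [] := by
      apply List.drop_eq_nil_of_le
      simp [List.length_zip, List.length_tail]
      omega
    simp [this]
  | succ k ih =>
    intro c resul hc hlen
    rw [funcLoop]
    have hlt : c < (l.length : Int) - 1 := by omega
    rw [if_pos hlt]
    rw [ih (c + 1) _ (by omega) (by omega)]
    have hzlen : c.toNat < (l.zip l.tail).length := by
      simp [List.length_zip, List.length_tail]; omega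
    have hdrop : (l.zip l.tail).drop c.toNat
        = (l.zip l.tail)[c.toNat] :: (l.zip l.tail).drop (c.toNat + 1) :=
      List.drop_eq_getElem_cons hzlen
    have hc1 : (c + 1).toNat = c.toNat + 1 := by omega
    have hcl : c.toNat < l.length := by omega
    have hcl1 : c.toNat + 1 < l.length := by omega
    have hget : (l.zip l.tail)[c.toNat] = (l[c.toNat], l[c.toNat + 1]) := by
      rw [List.getElem_zip]
      congr 1
      simp [List.getElem_tail]
    have hpg1 : PySem.List.pyGetD l c 0 = l[c.toNat] :=
      PySem.List.pyGetD_eq_getElem l 0 hc (by omega)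
    have hpg2 : PySem.List.pyGetD l (c + 1) 0 = l[(c+1).toNat] :=
      PySem.List.pyGetD_eq_getElem l 0 (by omega) (by omega)
    rw [hdrop, hc1]
    simp only [List.map_cons, List.sum_cons, hget, hpg1, hpg2, hc1]
    ring

-- A equals the sum of rewards over adjacent pairs
lemma funcA_eq_sum (l : List Int) :
    func_fitness1 l
      = ((l.zip l.tail).map (fun p => (recompensa p.1 p.2).getD 0)).sum := by
  unfold func_fitness1
  cases hl : l with
  | nil => rw [funcLoop]; simp
  | cons x xs =>
    rw [← hl]
    have hlen : l.length = xs.length + 1 := by rw [hl]; simp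
    have := loopA l xs.length 0 0 (le_refl 0) (by omega)
    simpa using this

-- summing an if-single over a Nodup key list containing d picks out w
lemma sum_map_ite_zero (keys : List Int) (d w : Int) (hnd : keys.Nodup) (hmem : d ∈ keys) :
    (keys.map (fun k => if k = d then w else 0)).sum = w := by
  induction keys with
  | nil => cases hmem
  | cons k ks ih =>
    simp only [List.map_cons, List.sum_cons]
    by_cases hkd : k = d
    · have hnot : d ∉ ks := hkd ▸ (List.nodup_cons.mp hnd).1
      have hz : (ks.map (fun x => if x = d then w else 0)).sum = 0 := by
        rw [List.sum_eq_zero]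
        intro x hx
        obtain ⟨y, hy, rfl⟩ := List.mem_map.mp hx
        have hyd : y ≠ d := fun h => hnot (h ▸ hy)
        simp [hyd]
      simp [hkd, hz]
    · have hmem' : d ∈ ks := by
        cases List.mem_cons.mp hmem with
        | inl h => exact absurd h.symm hkd
        | inr h => exact h
      rw [ih (List.nodup_cons.mp hnd).2 hmem']
      simp [hkd]

-- the histogram identity: grouping by value and weighting by counts gives the plain sum
lemma histogram_sum (keys : List Int) (ds : List Int) (f : Int → Int)
    (hnd : keys.Nodup) (hcov : ∀ x ∈ ds, x ∈ keys) :
    (keys.map (fun k => f k * (ds.count k : Int))).sum = (ds.map f).sum := by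
  induction ds with
  | nil => simp
  | cons d ds ih =>
    have hcov' : ∀ x ∈ ds, x ∈ keys := fun x hx => hcov x (List.mem_cons_of_mem _ hx)
    have hdmem : d ∈ keys := hcov d List.mem_cons_self
    have hsplit : ∀ k : Int, f k * ((d :: ds).count k : Int)
        = f k * (ds.count k : Int) + (if k = d then f d else 0) := by
      intro k
      by_cases hkd : k = d
      · rw [hkd]
        simp
        ring
      · have hdk : ¬ d = k := fun h => hkd h.symm
        simp [hkd, hdk]
    calc (keys.map (fun k => f k * ((d :: ds).count k : Int))).sum
        = (keys.map (fun k => f k * (ds.count k : Int) + (if k = d then f d else 0))).sum := by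
          congr 1; exact List.map_congr_left (fun k _ => hsplit k)
      _ = (keys.map (fun k => f k * (ds.count k : Int))).sum
            + (keys.map (fun k => if k = d then f d else 0)).sum := by
          rw [← List.sum_map_add]
      _ = (ds.map f).sum + f d := by
          rw [ih hcov', sum_map_ite_zero keys d (f d) hnd hdmem]
      _ = ((d :: ds).map f).sum := by simp; ring

-- B equals the sum of table rewards over adjacent pairs
lemma funcB_eq_sum (l : List Int) :
    func_fitness1_alt l
      = ((l.zip l.tail).map (fun p => wd (PySem.Int.mod |p.1 - p.2| 12))).sum := by
  unfold func_fitness1_alt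
  rw [PySem.List.slice_from_one]
  set ds := (l.zip l.tail).map (fun p => PySem.Int.mod |p.1 - p.2| 12) with hds
  have hfold : (l.zip l.tail).foldl
      (fun d p => d.modify (PySem.Int.mod |p.1 - p.2| 12) 0 (· + 1)) PySem.Dict.empty
      = PySem.Dict.counter ds := by
    rw [PySem.Dict.counter_eq_foldl, hds, List.foldl_map]
  simp only [hfold, PySem.Dict.items_counter, List.map_map]
  have hL : List.map ((fun kv : Int × Int => PySem.List.pyGetD rewardTable kv.1 0 * kv.2)
        ∘ fun k => (k, (ds.count k : Int))) (PySem.Set.ofList ds)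
      = List.map (fun k => wd k * (ds.count k : Int)) (PySem.Set.ofList ds) := by
    apply List.map_congr_left
    intro k _
    rfl
  rw [hL, histogram_sum (PySem.Set.ofList ds) ds wd (PySem.Set.nodup_ofList ds)
      (fun x hx => (PySem.Set.mem_ofList ds x).mpr hx)]
  rw [hds, List.map_map]
  rfl

-- ===== VERDICT (by name: the statement is the Claim_ definition above) =====
theorem func_fitness1_spec : Claim_equal_func_fitness1 := by
  intro l _
  unfold Spec_func_fitness1
  rw [funcA_eq_sum, funcB_eq_sum]
  congr 1
  exact List.map_congr_left (fun p _ => recompensa_eq p.1 p.2)
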